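-- pv_equiv track=rewrite | github.com/VKrishna04/My-Python-Life | Python - Practice/Projects/BiSection_Algorithm.py | prepare_expression
-- ===== SOURCE A (Python) =====
-- def insert_multiplication_operator(expression):
--     expression = list(expression)
--     for i in range(1, len(expression)):
--         if expression[i] == "x" and expression[i - 1].isdigit():
--             expression[i] = "*x"
--     return "".join(expression)
--
-- def prepare_expression(expression):
--     operators = {
--         "^": "**",
--         "sin": "math.sin",
--         "cos": "math.cos",
--         "tan": "math.tan",
--         "pi": "math.pi",
--         "sqrt": "math.sqrt",
--         "log": "math.log",
--         "e": "math.e",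
--     }
--
--     expression = insert_multiplication_operator(expression)
--
--     for operator, function in operators.items():
--         expression = expression.replace(operator, function)
--
--     return expression
-- ===== SOURCE B (Python) =====
-- # Single left-to-right pass: token rewriting and digit-x multiplication insertion
-- # fused into one scan (A does a separate insertion pass plus eight full-string replaces).
-- _TOKENS = (
--     ("sin", "math.sin"),
--     ("cos", "math.cos"),
--     ("tan", "math.tan"),
--     ("sqrt", "math.sqrt"),
--     ("log", "math.log"),
--     ("pi", "math.pi"),
--     ("e", "math.e"),
--     ("^", "**"),
-- )
--
-- def prepare_expression(expression):
--     out = []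
--     i = 0
--     prev_digit = False
--     n = len(expression)
--     while i < n:
--         for tok, rep in _TOKENS:
--             if expression.startswith(tok, i):
--                 out.append(rep)
--                 i += len(tok)
--                 prev_digit = False
--                 break
--         else:
--             c = expression[i]
--             if c == "x" and prev_digit:
--                 out.append("*x")
--             else:
--                 out.append(c)
--             prev_digit = c.isdigit()
--             i += 1
--     return "".join(out)
-- ===== Notes on version B (the rewrite author's own statement) =====
-- stated objective: alternative
-- what changed: A makes a separate multiplication-insertion pass and then eight sequential whole-string .replace passes; B rewrites the expression in one left-to-right scan that matches the operator tokens at each position and does the digit-before-x multiplication insertion in the same pass.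
-- outside the precondition, e.g. on prepare_expression('cosin'): A returns 'comath.sin', B returns 'math.cosin'; on prepare_expression('cosqrt'): A returns 'math.comath.sqrt', B returns 'math.cosqrt'; on prepare_expression('sqrtan'): A returns 'sqrmath.tan', B returns 'math.sqrtan'
import Mathlib
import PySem

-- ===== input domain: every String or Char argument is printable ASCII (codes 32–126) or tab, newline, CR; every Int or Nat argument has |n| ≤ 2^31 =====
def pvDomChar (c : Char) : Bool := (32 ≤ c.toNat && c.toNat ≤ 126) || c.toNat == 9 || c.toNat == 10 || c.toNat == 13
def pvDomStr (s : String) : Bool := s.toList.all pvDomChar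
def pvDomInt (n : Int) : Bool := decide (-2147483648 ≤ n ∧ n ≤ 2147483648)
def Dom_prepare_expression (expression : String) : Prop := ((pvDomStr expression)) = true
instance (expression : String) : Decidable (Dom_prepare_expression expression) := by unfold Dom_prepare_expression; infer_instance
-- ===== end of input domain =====

-- B replaces A's insertion pass plus eight whole-string `.replace` passes by one
-- left-to-right scan over the string (objective: alternative single-pass algorithm).

-- ===== PORT A =====
def insertMultiplicationOperator (expression : String) : String :=
  -- expression = list(expression); for i in range(1, len(expression)): ...; "".join(expression)
  let l0 : List String := expression.toList.map (fun c => String.singleton c)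
  let l1 := (PySem.List.pyRange 1 (PySem.Str.len expression) 1).foldl
      (fun acc i =>
        if PySem.List.pyGetD acc i "" == "x" &&
           PySem.Str.strIsdigit (PySem.List.pyGetD acc (i - 1) "")
        then PySem.List.pySetD acc i "*x" else acc) l0
  PySem.Str.join "" l1

def prepare_expression (expression : String) : String :=
  let operators : List (String × String) :=
    [("^", "**"), ("sin", "math.sin"), ("cos", "math.cos"), ("tan", "math.tan"),
     ("pi", "math.pi"), ("sqrt", "math.sqrt"), ("log", "math.log"), ("e", "math.e")]
  let expression1 := insertMultiplicationOperator expression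
  operators.foldl (fun e p => PySem.Str.replace e p.1 p.2) expression1

-- ===== PORT B =====
-- Source B's token tuple, in the same order
def pvTokens : List (List Char × List Char) :=
  [("sin".toList, "math.sin".toList), ("cos".toList, "math.cos".toList),
   ("tan".toList, "math.tan".toList), ("sqrt".toList, "math.sqrt".toList),
   ("log".toList, "math.log".toList), ("pi".toList, "math.pi".toList),
   ("e".toList, "math.e".toList), ("^".toList, "**".toList)]

-- the single scan of Source B: try the tokens at the current position, else handle
-- the digit-x insertion / plain character, tracking whether the previous char was a digit
def pvScan : List Char → Bool → List Char
  | [], _ => []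
  | c :: t, prevDigit =>
    match h : pvTokens.find? (fun p => p.1.isPrefixOf (c :: t)) with
    | some p => p.2 ++ pvScan ((c :: t).drop p.1.length) false
    | none =>
      if c = 'x' ∧ prevDigit = true then '*' :: 'x' :: pvScan t false
      else c :: pvScan t (PySem.Chars.isdigit c)
termination_by l _ => l.length
decreasing_by
  · have hmem := List.mem_of_find?_eq_some h
    have hne : p.1.length ≠ 0 := by
      simp only [pvTokens, List.mem_cons, List.not_mem_nil, or_false] at hmem
      rcases hmem with h' | h' | h' | h' | h' | h' | h' | h' <;> subst h' <;> decide
    simp only [List.length_drop, List.length_cons]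
    omega
  · simp
  · simp

def prepare_expression_alt (expression : String) : String :=
  String.ofList (pvScan expression.toList false)

-- ===== PRECONDITION & SPEC =====
-- Pre_ excludes expressions containing "cosin", "cosqrt" or "sqrtan": there A's value is an
-- accident of the order of its eight sequential global replaces over overlapping tokens
-- (and of a token re-formed across a replacement boundary), as defensible as B's
-- leftmost-match value; the expression is garbage for eval either way.
def Pre_prepare_expression (expression : String) : Prop :=
  PySem.Str.isIn "cosin" expression = false ∧
  PySem.Str.isIn "cosqrt" expression = false ∧
  PySem.Str.isIn "sqrtan" expression = false
instance (expression : String) : Decidable (Pre_prepare_expression expression) := by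
  unfold Pre_prepare_expression; infer_instance

def pvWitness_prepare_expression : String := "sin(3x)^2 + cos(x) - log(e)"

def Spec_prepare_expression (expression : String) (out : String) : Prop := out = prepare_expression_alt expression
instance (expression : String) (out : String) : Decidable (Spec_prepare_expression expression out) := by unfold Spec_prepare_expression; infer_instance

-- ===== CLAIM (what is proved, stated in full; the proofs are below) =====
def Claim_equal_prepare_expression : Prop := ∀ (expression : String), Dom_prepare_expression expression → Pre_prepare_expression expression → Spec_prepare_expression expression (prepare_expression expression)

-- ===== LEMMAS AND PROOFS =====

-- char-level model of one Python str.replace (old ≠ []), structural in the string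
def pvRW (u v : List Char) : List Char → List Char
  | [] => []
  | c :: t =>
    if h : u ≠ [] ∧ u.isPrefixOf (c :: t) then v ++ pvRW u v ((c :: t).drop u.length)
    else c :: pvRW u v t
termination_by l => l.length
decreasing_by
  · have : u.length ≠ 0 := by
      intro h0; exact h.1 (List.eq_nil_of_length_eq_zero h0)
    simp only [List.length_drop, List.length_cons]; omega
  · simp

-- char-level model of A's multiplication-insertion pass
def pvIns : List Char → Bool → List Char
  | [], _ => []
  | c :: t, pd =>
    if c = 'x' ∧ pd = true then '*' :: 'x' :: pvIns t false
    else c :: pvIns t (PySem.Chars.isdigit c)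

-- A's eight replaces, in A's dict order
def pvChainR (l : List Char) : List Char :=
  pvRW "e".toList "math.e".toList
    (pvRW "log".toList "math.log".toList
      (pvRW "sqrt".toList "math.sqrt".toList
        (pvRW "pi".toList "math.pi".toList
          (pvRW "tan".toList "math.tan".toList
            (pvRW "cos".toList "math.cos".toList
              (pvRW "sin".toList "math.sin".toList
                (pvRW "^".toList "**".toList l)))))))

def pvClean (cs : List Char) : Prop :=
  ¬ "cosin".toList <:+: cs ∧ ¬ "cosqrt".toList <:+: cs ∧ ¬ "sqrtan".toList <:+: cs

-- replace = pvRW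
theorem pvGo_eq (u v : List Char) (hu : u ≠ []) :
    ∀ (fuel : Nat) (l acc : List Char), l.length ≤ fuel →
      PySem.Chars.replace.go u v fuel l acc = acc.reverse ++ pvRW u v l := by
  intro fuel
  induction fuel with
  | zero =>
    intro l acc hl
    have : l = [] := List.eq_nil_of_length_eq_zero (Nat.le_zero.mp hl)
    subst this
    rw [PySem.Chars.replace.go.eq_def]
    simp [pvRW]
  | succ fuel ih =>
    intro l acc hl
    match l with
    | [] =>
      rw [PySem.Chars.replace.go.eq_def]
      simp [pvRW]
    | c :: t =>
      rw [PySem.Chars.replace.go.eq_def]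
      simp only []
      by_cases hpre : u.isPrefixOf (c :: t)
      · rw [if_pos hpre]
        have hlen : ((c :: t).drop u.length).length ≤ fuel := by
          have hul : u.length ≠ 0 := by
            intro h0; exact hu (List.eq_nil_of_length_eq_zero h0)
          simp only [List.length_drop, List.length_cons]
          simp only [List.length_cons] at hl
          omega
        rw [ih _ _ hlen]
        rw [pvRW]
        rw [dif_pos ⟨hu, hpre⟩]
        simp
      · rw [if_neg hpre]
        have hlen : t.length ≤ fuel := by
          simp only [List.length_cons] at hl; omega
        rw [ih _ _ hlen]
        rw [pvRW]
        rw [dif_neg (by simp [hpre])]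
        simp

theorem pvReplace_eq (u v l : List Char) (hu : u ≠ []) :
    PySem.Chars.replace l u v = pvRW u v l := by
  rw [PySem.Chars.replace]
  rw [if_neg (by simp [hu])]
  simpa using pvGo_eq u v hu l.length l [] le_rfl

theorem pvRW_nil (u v : List Char) : pvRW u v [] = [] := by simp [pvRW]

theorem pvRW_pos (u v l : List Char) (hu : u ≠ []) (h : u <+: l) :
    pvRW u v l = v ++ pvRW u v (l.drop u.length) := by
  match l with
  | [] =>
    rcases h with ⟨w, hw⟩
    have : u = [] := by
      cases u with
      | nil => rfl
      | cons a b => simp at hw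
    exact absurd this hu
  | c :: t =>
    rw [pvRW, dif_pos ⟨hu, List.isPrefixOf_iff_prefix.mpr h⟩]

theorem pvRW_neg (u v : List Char) (c : Char) (t : List Char) (h : ¬ u <+: (c :: t)) :
    pvRW u v (c :: t) = c :: pvRW u v t := by
  rw [pvRW, dif_neg]
  intro ⟨_, h2⟩
  exact h (List.isPrefixOf_iff_prefix.mp h2)

theorem pvRW_skip (u v : List Char) (b Y : List Char)
    (h : ∀ i, i < b.length → ¬ u <+: (b.drop i ++ Y)) :
    pvRW u v (b ++ Y) = b ++ pvRW u v Y := by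
  induction b with
  | nil => simp
  | cons c b' ih =>
    have h0 : ¬ u <+: (c :: (b' ++ Y)) := by
      have := h 0 (by simp)
      simpa using this
    rw [List.cons_append, pvRW_neg u v c (b' ++ Y) h0, ih]
    · simp
    · intro i hi
      have := h (i + 1) (by simp; omega)
      simpa using this

theorem pvRW_no_new_prefix (u v : List Char) (hu : u ≠ [])
    (vc : Char) (vt : List Char) (hv : v = vc :: vt) :
    ∀ (l p : List Char), vc ∉ p → p <+: pvRW u v l → p <+: l := by
  intro l
  induction l using pvRW.induct (u := u) with
  | case1 => intro p _ hp; simpa [pvRW] using hp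
  | case2 c t h ih =>
    intro p hvc hp
    rw [pvRW, dif_pos h] at hp
    match p with
    | [] => exact List.nil_prefix
    | q :: p' =>
      rw [hv] at hp
      rw [List.cons_append] at hp
      rw [List.cons_prefix_cons] at hp
      exact absurd (hp.1 ▸ List.mem_cons_self) hvc
  | case3 c t h ih =>
    intro p hvc hp
    rw [pvRW, dif_neg h] at hp
    match p with
    | [] => exact List.nil_prefix
    | q :: p' =>
      rw [List.cons_prefix_cons] at hp
      have := ih p' (fun hm => hvc (List.mem_cons_of_mem _ hm)) hp.2
      exact List.cons_prefix_cons.mpr ⟨hp.1, this⟩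

theorem pvIns_no_new_prefix :
    ∀ (l : List Char) (pd : Bool) (p : List Char), '*' ∉ p → p <+: pvIns l pd → p <+: l := by
  intro l
  induction l with
  | nil => intro pd p _ hp; simpa [pvIns] using hp
  | cons c t ih =>
    intro pd p hstar hp
    rw [pvIns] at hp
    split at hp
    · match p with
      | [] => exact List.nil_prefix
      | q :: p' =>
        rw [List.cons_prefix_cons] at hp
        exact absurd (hp.1 ▸ List.mem_cons_self) hstar
    · match p with
      | [] => exact List.nil_prefix
      | q :: p' =>
        rw [List.cons_prefix_cons] at hp
        have := ih _ p' (fun hm => hstar (List.mem_cons_of_mem _ hm)) hp.2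
        exact List.cons_prefix_cons.mpr ⟨hp.1, this⟩


theorem pvScan_nil (pd : Bool) : pvScan [] pd = [] := by rw [pvScan]

theorem pvScan_token (u w r : List Char) (pd : Bool) (hu : u ≠ [])
    (hfind : pvTokens.find? (fun p => p.1.isPrefixOf (u ++ r)) = some (u, w)) :
    pvScan (u ++ r) pd = w ++ pvScan r false := by
  match u with
  | a :: u' =>
    rw [pvScan.eq_def]
    simp only [List.cons_append] at hfind ⊢
    rw [hfind]
    simp [List.drop_left']

theorem pvScan_plain (c : Char) (t : List Char) (pd : Bool)
    (hfind : pvTokens.find? (fun p => p.1.isPrefixOf (c :: t)) = none) :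
    pvScan (c :: t) pd = if c = 'x' ∧ pd = true then '*' :: 'x' :: pvScan t false
      else c :: pvScan t (PySem.Chars.isdigit c) := by
  conv_lhs => rw [pvScan.eq_def]
  simp only []
  split
  · rename_i p hp
    rw [hfind] at hp
    cases hp
  · rfl

theorem pvIns_nil (pd : Bool) : pvIns [] pd = [] := by rw [pvIns]

theorem pvIns_cons (c : Char) (t : List Char) (pd : Bool) :
    pvIns (c :: t) pd = if c = 'x' ∧ pd = true then '*' :: 'x' :: pvIns t false
      else c :: pvIns t (PySem.Chars.isdigit c) := by rw [pvIns]

theorem pvIns_token : ∀ (u : List Char) (r : List Char) (pd : Bool), u ≠ [] →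
    (∀ c ∈ u, ¬ c = 'x' ∧ PySem.Chars.isdigit c = false) →
    pvIns (u ++ r) pd = u ++ pvIns r false := by
  intro u
  induction u with
  | nil => intro r pd h; exact absurd rfl h
  | cons a u' ih =>
    intro r pd _ hc
    have ha := hc a List.mem_cons_self
    rw [List.cons_append, pvIns, if_neg (by simp [ha.1]), ha.2]
    cases u' with
    | nil => simp
    | cons b u'' =>
      rw [ih r false (by simp) (fun c hm => hc c (List.mem_cons_of_mem _ hm))]
      simp

theorem pvNoNew (u v : List Char) (hu : u ≠ []) (vc : Char) (vt : List Char)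
    (hv : v = vc :: vt) (p l : List Char) (hvc : vc ∉ p) (h : ¬ p <+: l) :
    ¬ p <+: pvRW u v l :=
  fun hp => h (pvRW_no_new_prefix u v hu vc vt hv l p hvc hp)

theorem pvNoNewIns (p l : List Char) (pd : Bool) (hstar : '*' ∉ p) (h : ¬ p <+: l) :
    ¬ p <+: pvIns l pd :=
  fun hp => h (pvIns_no_new_prefix l pd p hstar hp)

theorem pvChainR_nil : pvChainR [] = [] := by
  simp [pvChainR, pvRW_nil]

theorem pvB_eq (s : String) : (prepare_expression_alt s).toList = pvScan s.toList false := by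
  simp [prepare_expression_alt]


-- A's fold with index-wise spec
def pvG (cs : List Char) (k : Nat) : List String :=
  (List.range cs.length).map (fun i =>
    if i < k ∧ 1 ≤ i ∧ cs.getD i ' ' = 'x' ∧ PySem.Chars.isdigit (cs.getD (i - 1) ' ') = true
    then "*x" else String.singleton (cs.getD i ' '))

theorem pvSingleton_eq_x (a : Char) : (String.singleton a = "x") ↔ a = 'x' := by
  constructor
  · intro h
    have := congrArg String.toList h
    simpa using this
  · intro h
    subst h
    apply String.toList_injective
    simp

theorem pvStrIsdigit_singleton (a : Char) :
    PySem.Str.strIsdigit (String.singleton a) = PySem.Chars.isdigit a := by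
  rw [PySem.Str.strIsdigit_eq]
  simp [PySem.Chars.strIsdigit]

theorem pvG_getD (cs : List Char) (k j : Nat) (hj : j < cs.length) :
    (pvG cs k).getD j "" =
      (if j < k ∧ 1 ≤ j ∧ cs.getD j ' ' = 'x' ∧ PySem.Chars.isdigit (cs.getD (j - 1) ' ') = true
       then "*x" else String.singleton (cs.getD j ' ')) := by
  simp [pvG, List.getD, hj]

theorem pvG_init (cs : List Char) (k : Nat) (hk : k ≤ 1) :
    pvG cs k = cs.map (fun c => String.singleton c) := by
  apply List.ext_getElem
  · simp [pvG]
  · intro j h1 h2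
    simp only [pvG, List.getElem_map, List.getElem_range]
    rw [if_neg (by omega)]
    have hj : j < cs.length := by simpa using h2
    simp [List.getD, List.getElem?_eq_getElem hj]

theorem pvFold (cs : List Char) :
    ∀ (k : Nat), k ≤ cs.length →
      (PySem.List.pyRange 1 (k : Int) 1).foldl
        (fun acc i =>
          if PySem.List.pyGetD acc i "" == "x" &&
             PySem.Str.strIsdigit (PySem.List.pyGetD acc (i - 1) "")
          then PySem.List.pySetD acc i "*x" else acc)
        (cs.map (fun c => String.singleton c)) = pvG cs k := by
  intro k
  induction k with
  | zero =>
    intro _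
    rw [PySem.List.pyRange_one_eq_nil (by norm_num)]
    rw [List.foldl_nil, pvG_init cs 0 (by omega)]
  | succ k ih =>
    intro hk1
    have hk : k ≤ cs.length := Nat.le_of_succ_le hk1
    have hkk : k < cs.length := hk1
    by_cases hk0 : k = 0
    · subst hk0
      rw [show ((0 + 1 : Nat) : Int) = 1 from by norm_num]
      rw [PySem.List.pyRange_one_eq_nil (by norm_num)]
      rw [List.foldl_nil, pvG_init cs 1 (by omega)]
    · have h1k : 1 ≤ k := Nat.pos_of_ne_zero hk0
      rw [show ((k + 1 : Nat) : Int) = (k : Int) + 1 from by push_cast; ring]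
      rw [PySem.List.pyRange_one_succ_right (by exact_mod_cast h1k)]
      rw [List.foldl_append, ih hk]
      rw [List.foldl_cons, List.foldl_nil]
      rw [show ((k : Int) - 1) = (((k - 1 : Nat)) : Int) from by omega]
      rw [PySem.List.pyGetD_natCast, PySem.List.pyGetD_natCast]
      have hAtK : (pvG cs k).getD k "" = String.singleton (cs.getD k ' ') := by
        rw [pvG_getD cs k k hkk]
        exact if_neg (by intro h; exact absurd h.1 (lt_irrefl k))
      rw [hAtK, pvG_getD cs k (k - 1) (by omega)]
      by_cases hcond : cs.getD k ' ' = 'x' ∧ PySem.Chars.isdigit (cs.getD (k - 1) ' ') = true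
      · have hbeq : (String.singleton (cs.getD k ' ') == "x") = true := by
          rw [beq_iff_eq, pvSingleton_eq_x]; exact hcond.1
        have hdig : PySem.Str.strIsdigit
            (if k - 1 < k ∧ 1 ≤ k - 1 ∧ cs.getD (k - 1) ' ' = 'x' ∧
                PySem.Chars.isdigit (cs.getD (k - 1 - 1) ' ') = true
             then "*x" else String.singleton (cs.getD (k - 1) ' ')) = true := by
          split_ifs with hh
          · exfalso
            have := hcond.2
            rw [hh.2.2.1] at this
            exact absurd this (by decide)
          · rw [pvStrIsdigit_singleton]; exact hcond.2
        rw [hbeq, hdig]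
        rw [show (true && true) = true from rfl, if_pos rfl]
        rw [PySem.List.pySetD_natCast]
        apply List.ext_getElem
        · simp [pvG]
        · intro j hj1 hj2
          have hjlen : j < cs.length := by simpa [pvG] using hj2
          rw [List.getElem_set]
          simp only [pvG, List.getElem_map, List.getElem_range]
          by_cases hjk : k = j
          · subst hjk
            rw [if_pos rfl, if_pos ⟨by omega, by omega, hcond.1, hcond.2⟩]
          · rw [if_neg hjk]
            refine if_congr ?_ rfl rfl
            constructor
            · rintro ⟨ha, hb, hc, hd⟩; exact ⟨by omega, hb, hc, hd⟩
            · rintro ⟨ha, hb, hc, hd⟩; exact ⟨by omega, hb, hc, hd⟩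
      · have hfalse : (String.singleton (cs.getD k ' ') == "x" &&
            PySem.Str.strIsdigit
              (if k - 1 < k ∧ 1 ≤ k - 1 ∧ cs.getD (k - 1) ' ' = 'x' ∧
                  PySem.Chars.isdigit (cs.getD (k - 1 - 1) ' ') = true
               then "*x" else String.singleton (cs.getD (k - 1) ' '))) = false := by
          rw [Bool.and_eq_false_iff]
          by_cases hx : cs.getD k ' ' = 'x'
          · right
            split_ifs with hh
            · exact (by decide : PySem.Str.strIsdigit "*x" = false)
            · rw [pvStrIsdigit_singleton]
              rcases Bool.eq_false_or_eq_true (PySem.Chars.isdigit (cs.getD (k - 1) ' ')) with h | h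
              · exact absurd ⟨hx, h⟩ hcond
              · exact h
          · left
            rw [Bool.eq_false_iff]
            intro hb
            exact hx (pvSingleton_eq_x _ |>.mp (beq_iff_eq.mp hb))
        rw [hfalse, if_neg (by simp)]
        apply List.ext_getElem
        · simp [pvG]
        · intro j hj1 hj2
          simp only [pvG, List.getElem_map, List.getElem_range]
          refine if_congr ?_ rfl rfl
          constructor
          · rintro ⟨ha, hb, hc, hd⟩; exact ⟨by omega, hb, hc, hd⟩
          · rintro ⟨ha, hb, hc, hd⟩
            refine ⟨?_, hb, hc, hd⟩
            rcases Nat.lt_succ_iff_lt_or_eq.mp ha with h | h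
            · exact h
            · subst h; exact absurd ⟨hc, hd⟩ hcond

theorem pvJoinNil (parts : List (List Char)) : PySem.Chars.join [] parts = parts.flatten := by
  induction parts with
  | nil => simp [PySem.Chars.join_nil]
  | cons p rest ih =>
    cases rest with
    | nil => simp [PySem.Chars.join_singleton]
    | cons q rest' =>
      rw [PySem.Chars.join_cons_cons]
      simp [ih]

theorem pvJoin : ∀ (cs : List Char) (p : Char),
    (((List.range cs.length).map (fun i =>
        if cs.getD i ' ' = 'x' ∧ PySem.Chars.isdigit ((p :: cs).getD i ' ') = true
        then "*x" else String.singleton (cs.getD i ' '))).map String.toList).flatten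
      = pvIns cs (PySem.Chars.isdigit p) := by
  intro cs
  induction cs with
  | nil => intro p; simp [pvIns_nil]
  | cons c u ih =>
    intro p
    rw [List.length_cons, List.range_succ_eq_map]
    rw [List.map_cons, List.map_cons, List.flatten_cons]
    rw [List.map_map, List.map_map]
    rw [pvIns_cons]
    by_cases hc : c = 'x' ∧ PySem.Chars.isdigit p = true
    · rw [if_pos (by simpa using hc), if_pos hc]
      have hx : PySem.Chars.isdigit c = false := by rw [hc.1]; decide
      have := ih c
      rw [hx] at this
      rw [← this]
      simp [Function.comp_def]
    · rw [if_neg (by simpa using hc), if_neg hc]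
      have := ih c
      rw [← this]
      simp [Function.comp_def]

theorem pvInsMul_eq (s : String) :
    (insertMultiplicationOperator s).toList = pvIns s.toList false := by
  have hlen : PySem.Str.len s = ((s.toList.length : Nat) : Int) := by simp
  rw [insertMultiplicationOperator]
  simp only [hlen]
  rw [pvFold s.toList s.toList.length le_rfl]
  rw [PySem.Str.toList_join]
  have hmap : (pvG s.toList s.toList.length).map String.toList =
      ((List.range s.toList.length).map (fun i =>
        if s.toList.getD i ' ' = 'x' ∧ PySem.Chars.isdigit ((' ' :: s.toList).getD i ' ') = true
        then "*x" else String.singleton (s.toList.getD i ' '))).map String.toList := by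
    apply congrArg
    rw [pvG.eq_def]
    apply List.map_congr_left
    intro i hi
    rw [List.mem_range] at hi
    rcases Nat.eq_zero_or_pos i with h0 | h1
    · subst h0
      rw [List.getD_cons_zero]
      rw [show PySem.Chars.isdigit ' ' = false from by decide]
      simp
    · have hprev : (' ' :: s.toList).getD i ' ' = s.toList.getD (i - 1) ' ' := by
        match i, h1 with
        | (j+1), _ => simp
      rw [hprev]
      refine if_congr ?_ rfl rfl
      constructor
      · rintro ⟨_, _, h3, h4⟩; exact ⟨h3, h4⟩
      · rintro ⟨h3, h4⟩; exact ⟨hi, h1, h3, h4⟩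
  rw [show ("" : String).toList = ([] : List Char) from rfl]
  rw [hmap, pvJoinNil]
  have := pvJoin s.toList ' '
  rw [show PySem.Chars.isdigit ' ' = false from by decide] at this
  exact this

theorem pvA_eq (s : String) :
    (prepare_expression s).toList = pvChainR (pvIns s.toList false) := by
  rw [← pvInsMul_eq]
  simp only [prepare_expression, List.foldl]
  simp only [PySem.Str.toList_replace]
  rw [pvReplace_eq _ _ _ (by decide), pvReplace_eq _ _ _ (by decide),
      pvReplace_eq _ _ _ (by decide), pvReplace_eq _ _ _ (by decide),
      pvReplace_eq _ _ _ (by decide), pvReplace_eq _ _ _ (by decide),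
      pvReplace_eq _ _ _ (by decide), pvReplace_eq _ _ _ (by decide)]
  rfl













theorem pvClean_mono (l cs : List Char) (h : l <:+: cs) (hc : pvClean cs) : pvClean l :=
  ⟨fun hi => hc.1 (hi.trans h), fun hi => hc.2.1 (hi.trans h), fun hi => hc.2.2 (hi.trans h)⟩

set_option maxRecDepth 8192 in
theorem pvMain : ∀ (n : Nat) (cs : List Char), cs.length ≤ n → pvClean cs →
    ∀ pd, pvChainR (pvIns cs pd) = pvScan cs pd := by
  intro n
  induction n with
  | zero =>
    intro cs hlen _ pd
    have : cs = [] := List.eq_nil_of_length_eq_zero (Nat.le_zero.mp hlen)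
    subst this
    rw [pvIns_nil, pvChainR_nil, pvScan_nil]
  | succ n ih =>
    intro cs hlen hcl pd
    match cs with
    | [] => rw [pvIns_nil, pvChainR_nil, pvScan_nil]
    | c :: t =>
      by_cases hsin : "sin".toList <+: (c :: t)
      ·
        obtain ⟨r, hr⟩ := hsin
        rw [← hr] at hcl hlen
        rw [← hr]
        have hrlen : r.length ≤ n := by simp at hlen; omega
        have hclr : pvClean r := pvClean_mono r _ (List.suffix_append _ _).isInfix hcl
        have hfind : pvTokens.find? (fun p => p.1.isPrefixOf ("sin".toList ++ r)) = some ("sin".toList, "math.sin".toList) := by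
          rw [pvTokens]
          exact List.find?_cons_of_pos (by simp [List.isPrefixOf_iff_prefix])
        rw [pvScan_token "sin".toList "math.sin".toList r pd (by simp <;> decide) hfind]
        rw [pvIns_token "sin".toList r pd (by simp <;> decide) (by simp <;> decide)]
        simp only [pvChainR]
        rw [pvRW_skip "^".toList "**".toList "sin".toList (pvIns r false) (by intro i hi; have hb : i < 3 := (by simpa using hi); clear hi; interval_cases i <;> simp [List.cons_prefix_cons])]
        rw [pvRW_pos "sin".toList "math.sin".toList ("sin".toList ++ (pvRW "^".toList "**".toList (pvIns r false))) (by simp <;> decide) (List.prefix_append _ _), List.drop_left]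
        rw [pvRW_skip "cos".toList "math.cos".toList "math.sin".toList (pvRW "sin".toList "math.sin".toList (pvRW "^".toList "**".toList (pvIns r false))) (by intro i hi; have hb : i < 8 := (by simpa using hi); clear hi; interval_cases i <;> simp [List.cons_prefix_cons])]
        rw [pvRW_skip "tan".toList "math.tan".toList "math.sin".toList (pvRW "cos".toList "math.cos".toList (pvRW "sin".toList "math.sin".toList (pvRW "^".toList "**".toList (pvIns r false)))) (by intro i hi; have hb : i < 8 := (by simpa using hi); clear hi; interval_cases i <;> simp [List.cons_prefix_cons])]
        rw [pvRW_skip "pi".toList "math.pi".toList "math.sin".toList (pvRW "tan".toList "math.tan".toList (pvRW "cos".toList "math.cos".toList (pvRW "sin".toList "math.sin".toList (pvRW "^".toList "**".toList (pvIns r false))))) (by intro i hi; have hb : i < 8 := (by simpa using hi); clear hi; interval_cases i <;> simp [List.cons_prefix_cons])]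
        rw [pvRW_skip "sqrt".toList "math.sqrt".toList "math.sin".toList (pvRW "pi".toList "math.pi".toList (pvRW "tan".toList "math.tan".toList (pvRW "cos".toList "math.cos".toList (pvRW "sin".toList "math.sin".toList (pvRW "^".toList "**".toList (pvIns r false)))))) (by intro i hi; have hb : i < 8 := (by simpa using hi); clear hi; interval_cases i <;> simp [List.cons_prefix_cons])]
        rw [pvRW_skip "log".toList "math.log".toList "math.sin".toList (pvRW "sqrt".toList "math.sqrt".toList (pvRW "pi".toList "math.pi".toList (pvRW "tan".toList "math.tan".toList (pvRW "cos".toList "math.cos".toList (pvRW "sin".toList "math.sin".toList (pvRW "^".toList "**".toList (pvIns r false))))))) (by intro i hi; have hb : i < 8 := (by simpa using hi); clear hi; interval_cases i <;> simp [List.cons_prefix_cons])]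
        rw [pvRW_skip "e".toList "math.e".toList "math.sin".toList (pvRW "log".toList "math.log".toList (pvRW "sqrt".toList "math.sqrt".toList (pvRW "pi".toList "math.pi".toList (pvRW "tan".toList "math.tan".toList (pvRW "cos".toList "math.cos".toList (pvRW "sin".toList "math.sin".toList (pvRW "^".toList "**".toList (pvIns r false)))))))) (by intro i hi; have hb : i < 8 := (by simpa using hi); clear hi; interval_cases i <;> simp [List.cons_prefix_cons])]
        exact congrArg (fun z => _ ++ z) (ih r hrlen hclr false)
      by_cases hcos : "cos".toList <+: (c :: t)
      ·
        obtain ⟨r, hr⟩ := hcos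
        rw [← hr] at hcl hlen hsin
        rw [← hr]
        have hrlen : r.length ≤ n := by simp at hlen; omega
        have hclr : pvClean r := pvClean_mono r _ (List.suffix_append _ _).isInfix hcl
        have hstr_in0 : ¬ "in".toList <+: r := by
          intro hp
          obtain ⟨r2, hr2⟩ := hp
          exact hcl.1 ⟨[], r2, by rw [← hr2]; simp⟩
        have hstr_in1 : ¬ "in".toList <+: (pvIns r false) := pvNoNewIns _ _ _ (by simp <;> decide) hstr_in0
        have hstr_in2 : ¬ "in".toList <+: (pvRW "^".toList "**".toList (pvIns r false)) := pvNoNew "^".toList "**".toList (by simp <;> decide) '*' ['*'] (by simp <;> decide) _ _ (by simp <;> decide) hstr_in1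
        have hstr_qrt0 : ¬ "qrt".toList <+: r := by
          intro hp
          obtain ⟨r2, hr2⟩ := hp
          exact hcl.2.1 ⟨[], r2, by rw [← hr2]; simp⟩
        have hstr_qrt1 : ¬ "qrt".toList <+: (pvIns r false) := pvNoNewIns _ _ _ (by simp <;> decide) hstr_qrt0
        have hstr_qrt2 : ¬ "qrt".toList <+: (pvRW "^".toList "**".toList (pvIns r false)) := pvNoNew "^".toList "**".toList (by simp <;> decide) '*' ['*'] (by simp <;> decide) _ _ (by simp <;> decide) hstr_qrt1
        have hstr_qrt3 : ¬ "qrt".toList <+: (pvRW "sin".toList "math.sin".toList (pvRW "^".toList "**".toList (pvIns r false))) := pvNoNew "sin".toList "math.sin".toList (by simp <;> decide) 'm' "ath.sin".toList (by simp <;> decide) _ _ (by simp <;> decide) hstr_qrt2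
        have hstr_qrt4 : ¬ "qrt".toList <+: (pvRW "cos".toList "math.cos".toList (pvRW "sin".toList "math.sin".toList (pvRW "^".toList "**".toList (pvIns r false)))) := pvNoNew "cos".toList "math.cos".toList (by simp <;> decide) 'm' "ath.cos".toList (by simp <;> decide) _ _ (by simp <;> decide) hstr_qrt3
        have hstr_qrt5 : ¬ "qrt".toList <+: (pvRW "tan".toList "math.tan".toList (pvRW "cos".toList "math.cos".toList (pvRW "sin".toList "math.sin".toList (pvRW "^".toList "**".toList (pvIns r false))))) := pvNoNew "tan".toList "math.tan".toList (by simp <;> decide) 'm' "ath.tan".toList (by simp <;> decide) _ _ (by simp <;> decide) hstr_qrt4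
        have hstr_qrt6 : ¬ "qrt".toList <+: (pvRW "pi".toList "math.pi".toList (pvRW "tan".toList "math.tan".toList (pvRW "cos".toList "math.cos".toList (pvRW "sin".toList "math.sin".toList (pvRW "^".toList "**".toList (pvIns r false)))))) := pvNoNew "pi".toList "math.pi".toList (by simp <;> decide) 'm' "ath.pi".toList (by simp <;> decide) _ _ (by simp <;> decide) hstr_qrt5
        have hfind : pvTokens.find? (fun p => p.1.isPrefixOf ("cos".toList ++ r)) = some ("cos".toList, "math.cos".toList) := by
          rw [pvTokens]
          rw [List.find?_cons_of_neg (by simpa [List.isPrefixOf_iff_prefix] using hsin)]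
          exact List.find?_cons_of_pos (by simp [List.isPrefixOf_iff_prefix])
        rw [pvScan_token "cos".toList "math.cos".toList r pd (by simp <;> decide) hfind]
        rw [pvIns_token "cos".toList r pd (by simp <;> decide) (by simp <;> decide)]
        simp only [pvChainR]
        rw [pvRW_skip "^".toList "**".toList "cos".toList (pvIns r false) (by intro i hi; have hb : i < 3 := (by simpa using hi); clear hi; interval_cases i <;> simp [List.cons_prefix_cons])]
        rw [pvRW_skip "sin".toList "math.sin".toList "cos".toList (pvRW "^".toList "**".toList (pvIns r false)) (by intro i hi; have hb : i < 3 := (by simpa using hi); clear hi; interval_cases i <;> simp [List.cons_prefix_cons] <;> simpa using hstr_in2)]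
        rw [pvRW_pos "cos".toList "math.cos".toList ("cos".toList ++ (pvRW "sin".toList "math.sin".toList (pvRW "^".toList "**".toList (pvIns r false)))) (by simp <;> decide) (List.prefix_append _ _), List.drop_left]
        rw [pvRW_skip "tan".toList "math.tan".toList "math.cos".toList (pvRW "cos".toList "math.cos".toList (pvRW "sin".toList "math.sin".toList (pvRW "^".toList "**".toList (pvIns r false)))) (by intro i hi; have hb : i < 8 := (by simpa using hi); clear hi; interval_cases i <;> simp [List.cons_prefix_cons])]
        rw [pvRW_skip "pi".toList "math.pi".toList "math.cos".toList (pvRW "tan".toList "math.tan".toList (pvRW "cos".toList "math.cos".toList (pvRW "sin".toList "math.sin".toList (pvRW "^".toList "**".toList (pvIns r false))))) (by intro i hi; have hb : i < 8 := (by simpa using hi); clear hi; interval_cases i <;> simp [List.cons_prefix_cons])]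
        rw [pvRW_skip "sqrt".toList "math.sqrt".toList "math.cos".toList (pvRW "pi".toList "math.pi".toList (pvRW "tan".toList "math.tan".toList (pvRW "cos".toList "math.cos".toList (pvRW "sin".toList "math.sin".toList (pvRW "^".toList "**".toList (pvIns r false)))))) (by intro i hi; have hb : i < 8 := (by simpa using hi); clear hi; interval_cases i <;> simp [List.cons_prefix_cons] <;> simpa using hstr_qrt6)]
        rw [pvRW_skip "log".toList "math.log".toList "math.cos".toList (pvRW "sqrt".toList "math.sqrt".toList (pvRW "pi".toList "math.pi".toList (pvRW "tan".toList "math.tan".toList (pvRW "cos".toList "math.cos".toList (pvRW "sin".toList "math.sin".toList (pvRW "^".toList "**".toList (pvIns r false))))))) (by intro i hi; have hb : i < 8 := (by simpa using hi); clear hi; interval_cases i <;> simp [List.cons_prefix_cons])]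
        rw [pvRW_skip "e".toList "math.e".toList "math.cos".toList (pvRW "log".toList "math.log".toList (pvRW "sqrt".toList "math.sqrt".toList (pvRW "pi".toList "math.pi".toList (pvRW "tan".toList "math.tan".toList (pvRW "cos".toList "math.cos".toList (pvRW "sin".toList "math.sin".toList (pvRW "^".toList "**".toList (pvIns r false)))))))) (by intro i hi; have hb : i < 8 := (by simpa using hi); clear hi; interval_cases i <;> simp [List.cons_prefix_cons])]
        exact congrArg (fun z => _ ++ z) (ih r hrlen hclr false)
      by_cases htan : "tan".toList <+: (c :: t)
      ·
        obtain ⟨r, hr⟩ := htan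
        rw [← hr] at hcl hlen hsin hcos
        rw [← hr]
        have hrlen : r.length ≤ n := by simp at hlen; omega
        have hclr : pvClean r := pvClean_mono r _ (List.suffix_append _ _).isInfix hcl
        have hfind : pvTokens.find? (fun p => p.1.isPrefixOf ("tan".toList ++ r)) = some ("tan".toList, "math.tan".toList) := by
          rw [pvTokens]
          rw [List.find?_cons_of_neg (by simpa [List.isPrefixOf_iff_prefix] using hsin)]
          rw [List.find?_cons_of_neg (by simpa [List.isPrefixOf_iff_prefix] using hcos)]
          exact List.find?_cons_of_pos (by simp [List.isPrefixOf_iff_prefix])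
        rw [pvScan_token "tan".toList "math.tan".toList r pd (by simp <;> decide) hfind]
        rw [pvIns_token "tan".toList r pd (by simp <;> decide) (by simp <;> decide)]
        simp only [pvChainR]
        rw [pvRW_skip "^".toList "**".toList "tan".toList (pvIns r false) (by intro i hi; have hb : i < 3 := (by simpa using hi); clear hi; interval_cases i <;> simp [List.cons_prefix_cons])]
        rw [pvRW_skip "sin".toList "math.sin".toList "tan".toList (pvRW "^".toList "**".toList (pvIns r false)) (by intro i hi; have hb : i < 3 := (by simpa using hi); clear hi; interval_cases i <;> simp [List.cons_prefix_cons])]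
        rw [pvRW_skip "cos".toList "math.cos".toList "tan".toList (pvRW "sin".toList "math.sin".toList (pvRW "^".toList "**".toList (pvIns r false))) (by intro i hi; have hb : i < 3 := (by simpa using hi); clear hi; interval_cases i <;> simp [List.cons_prefix_cons])]
        rw [pvRW_pos "tan".toList "math.tan".toList ("tan".toList ++ (pvRW "cos".toList "math.cos".toList (pvRW "sin".toList "math.sin".toList (pvRW "^".toList "**".toList (pvIns r false))))) (by simp <;> decide) (List.prefix_append _ _), List.drop_left]
        rw [pvRW_skip "pi".toList "math.pi".toList "math.tan".toList (pvRW "tan".toList "math.tan".toList (pvRW "cos".toList "math.cos".toList (pvRW "sin".toList "math.sin".toList (pvRW "^".toList "**".toList (pvIns r false))))) (by intro i hi; have hb : i < 8 := (by simpa using hi); clear hi; interval_cases i <;> simp [List.cons_prefix_cons])]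
        rw [pvRW_skip "sqrt".toList "math.sqrt".toList "math.tan".toList (pvRW "pi".toList "math.pi".toList (pvRW "tan".toList "math.tan".toList (pvRW "cos".toList "math.cos".toList (pvRW "sin".toList "math.sin".toList (pvRW "^".toList "**".toList (pvIns r false)))))) (by intro i hi; have hb : i < 8 := (by simpa using hi); clear hi; interval_cases i <;> simp [List.cons_prefix_cons])]
        rw [pvRW_skip "log".toList "math.log".toList "math.tan".toList (pvRW "sqrt".toList "math.sqrt".toList (pvRW "pi".toList "math.pi".toList (pvRW "tan".toList "math.tan".toList (pvRW "cos".toList "math.cos".toList (pvRW "sin".toList "math.sin".toList (pvRW "^".toList "**".toList (pvIns r false))))))) (by intro i hi; have hb : i < 8 := (by simpa using hi); clear hi; interval_cases i <;> simp [List.cons_prefix_cons])]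
        rw [pvRW_skip "e".toList "math.e".toList "math.tan".toList (pvRW "log".toList "math.log".toList (pvRW "sqrt".toList "math.sqrt".toList (pvRW "pi".toList "math.pi".toList (pvRW "tan".toList "math.tan".toList (pvRW "cos".toList "math.cos".toList (pvRW "sin".toList "math.sin".toList (pvRW "^".toList "**".toList (pvIns r false)))))))) (by intro i hi; have hb : i < 8 := (by simpa using hi); clear hi; interval_cases i <;> simp [List.cons_prefix_cons])]
        exact congrArg (fun z => _ ++ z) (ih r hrlen hclr false)
      by_cases hsqrt : "sqrt".toList <+: (c :: t)
      ·
        obtain ⟨r, hr⟩ := hsqrt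
        rw [← hr] at hcl hlen hsin hcos htan
        rw [← hr]
        have hrlen : r.length ≤ n := by simp at hlen; omega
        have hclr : pvClean r := pvClean_mono r _ (List.suffix_append _ _).isInfix hcl
        have hstr_an0 : ¬ "an".toList <+: r := by
          intro hp
          obtain ⟨r2, hr2⟩ := hp
          exact hcl.2.2 ⟨[], r2, by rw [← hr2]; simp⟩
        have hstr_an1 : ¬ "an".toList <+: (pvIns r false) := pvNoNewIns _ _ _ (by simp <;> decide) hstr_an0
        have hstr_an2 : ¬ "an".toList <+: (pvRW "^".toList "**".toList (pvIns r false)) := pvNoNew "^".toList "**".toList (by simp <;> decide) '*' ['*'] (by simp <;> decide) _ _ (by simp <;> decide) hstr_an1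
        have hstr_an3 : ¬ "an".toList <+: (pvRW "sin".toList "math.sin".toList (pvRW "^".toList "**".toList (pvIns r false))) := pvNoNew "sin".toList "math.sin".toList (by simp <;> decide) 'm' "ath.sin".toList (by simp <;> decide) _ _ (by simp <;> decide) hstr_an2
        have hstr_an4 : ¬ "an".toList <+: (pvRW "cos".toList "math.cos".toList (pvRW "sin".toList "math.sin".toList (pvRW "^".toList "**".toList (pvIns r false)))) := pvNoNew "cos".toList "math.cos".toList (by simp <;> decide) 'm' "ath.cos".toList (by simp <;> decide) _ _ (by simp <;> decide) hstr_an3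
        have hfind : pvTokens.find? (fun p => p.1.isPrefixOf ("sqrt".toList ++ r)) = some ("sqrt".toList, "math.sqrt".toList) := by
          rw [pvTokens]
          rw [List.find?_cons_of_neg (by simpa [List.isPrefixOf_iff_prefix] using hsin)]
          rw [List.find?_cons_of_neg (by simpa [List.isPrefixOf_iff_prefix] using hcos)]
          rw [List.find?_cons_of_neg (by simpa [List.isPrefixOf_iff_prefix] using htan)]
          exact List.find?_cons_of_pos (by simp [List.isPrefixOf_iff_prefix])
        rw [pvScan_token "sqrt".toList "math.sqrt".toList r pd (by simp <;> decide) hfind]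
        rw [pvIns_token "sqrt".toList r pd (by simp <;> decide) (by simp <;> decide)]
        simp only [pvChainR]
        rw [pvRW_skip "^".toList "**".toList "sqrt".toList (pvIns r false) (by intro i hi; have hb : i < 4 := (by simpa using hi); clear hi; interval_cases i <;> simp [List.cons_prefix_cons])]
        rw [pvRW_skip "sin".toList "math.sin".toList "sqrt".toList (pvRW "^".toList "**".toList (pvIns r false)) (by intro i hi; have hb : i < 4 := (by simpa using hi); clear hi; interval_cases i <;> simp [List.cons_prefix_cons])]
        rw [pvRW_skip "cos".toList "math.cos".toList "sqrt".toList (pvRW "sin".toList "math.sin".toList (pvRW "^".toList "**".toList (pvIns r false))) (by intro i hi; have hb : i < 4 := (by simpa using hi); clear hi; interval_cases i <;> simp [List.cons_prefix_cons])]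
        rw [pvRW_skip "tan".toList "math.tan".toList "sqrt".toList (pvRW "cos".toList "math.cos".toList (pvRW "sin".toList "math.sin".toList (pvRW "^".toList "**".toList (pvIns r false)))) (by intro i hi; have hb : i < 4 := (by simpa using hi); clear hi; interval_cases i <;> simp [List.cons_prefix_cons] <;> simpa using hstr_an4)]
        rw [pvRW_skip "pi".toList "math.pi".toList "sqrt".toList (pvRW "tan".toList "math.tan".toList (pvRW "cos".toList "math.cos".toList (pvRW "sin".toList "math.sin".toList (pvRW "^".toList "**".toList (pvIns r false))))) (by intro i hi; have hb : i < 4 := (by simpa using hi); clear hi; interval_cases i <;> simp [List.cons_prefix_cons])]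
        rw [pvRW_pos "sqrt".toList "math.sqrt".toList ("sqrt".toList ++ (pvRW "pi".toList "math.pi".toList (pvRW "tan".toList "math.tan".toList (pvRW "cos".toList "math.cos".toList (pvRW "sin".toList "math.sin".toList (pvRW "^".toList "**".toList (pvIns r false))))))) (by simp <;> decide) (List.prefix_append _ _), List.drop_left]
        rw [pvRW_skip "log".toList "math.log".toList "math.sqrt".toList (pvRW "sqrt".toList "math.sqrt".toList (pvRW "pi".toList "math.pi".toList (pvRW "tan".toList "math.tan".toList (pvRW "cos".toList "math.cos".toList (pvRW "sin".toList "math.sin".toList (pvRW "^".toList "**".toList (pvIns r false))))))) (by intro i hi; have hb : i < 9 := (by simpa using hi); clear hi; interval_cases i <;> simp [List.cons_prefix_cons])]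
        rw [pvRW_skip "e".toList "math.e".toList "math.sqrt".toList (pvRW "log".toList "math.log".toList (pvRW "sqrt".toList "math.sqrt".toList (pvRW "pi".toList "math.pi".toList (pvRW "tan".toList "math.tan".toList (pvRW "cos".toList "math.cos".toList (pvRW "sin".toList "math.sin".toList (pvRW "^".toList "**".toList (pvIns r false)))))))) (by intro i hi; have hb : i < 9 := (by simpa using hi); clear hi; interval_cases i <;> simp [List.cons_prefix_cons])]
        exact congrArg (fun z => _ ++ z) (ih r hrlen hclr false)
      by_cases hlog : "log".toList <+: (c :: t)
      ·
        obtain ⟨r, hr⟩ := hlog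
        rw [← hr] at hcl hlen hsin hcos htan hsqrt
        rw [← hr]
        have hrlen : r.length ≤ n := by simp at hlen; omega
        have hclr : pvClean r := pvClean_mono r _ (List.suffix_append _ _).isInfix hcl
        have hfind : pvTokens.find? (fun p => p.1.isPrefixOf ("log".toList ++ r)) = some ("log".toList, "math.log".toList) := by
          rw [pvTokens]
          rw [List.find?_cons_of_neg (by simpa [List.isPrefixOf_iff_prefix] using hsin)]
          rw [List.find?_cons_of_neg (by simpa [List.isPrefixOf_iff_prefix] using hcos)]
          rw [List.find?_cons_of_neg (by simpa [List.isPrefixOf_iff_prefix] using htan)]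
          rw [List.find?_cons_of_neg (by simpa [List.isPrefixOf_iff_prefix] using hsqrt)]
          exact List.find?_cons_of_pos (by simp [List.isPrefixOf_iff_prefix])
        rw [pvScan_token "log".toList "math.log".toList r pd (by simp <;> decide) hfind]
        rw [pvIns_token "log".toList r pd (by simp <;> decide) (by simp <;> decide)]
        simp only [pvChainR]
        rw [pvRW_skip "^".toList "**".toList "log".toList (pvIns r false) (by intro i hi; have hb : i < 3 := (by simpa using hi); clear hi; interval_cases i <;> simp [List.cons_prefix_cons])]
        rw [pvRW_skip "sin".toList "math.sin".toList "log".toList (pvRW "^".toList "**".toList (pvIns r false)) (by intro i hi; have hb : i < 3 := (by simpa using hi); clear hi; interval_cases i <;> simp [List.cons_prefix_cons])]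
        rw [pvRW_skip "cos".toList "math.cos".toList "log".toList (pvRW "sin".toList "math.sin".toList (pvRW "^".toList "**".toList (pvIns r false))) (by intro i hi; have hb : i < 3 := (by simpa using hi); clear hi; interval_cases i <;> simp [List.cons_prefix_cons])]
        rw [pvRW_skip "tan".toList "math.tan".toList "log".toList (pvRW "cos".toList "math.cos".toList (pvRW "sin".toList "math.sin".toList (pvRW "^".toList "**".toList (pvIns r false)))) (by intro i hi; have hb : i < 3 := (by simpa using hi); clear hi; interval_cases i <;> simp [List.cons_prefix_cons])]
        rw [pvRW_skip "pi".toList "math.pi".toList "log".toList (pvRW "tan".toList "math.tan".toList (pvRW "cos".toList "math.cos".toList (pvRW "sin".toList "math.sin".toList (pvRW "^".toList "**".toList (pvIns r false))))) (by intro i hi; have hb : i < 3 := (by simpa using hi); clear hi; interval_cases i <;> simp [List.cons_prefix_cons])]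
        rw [pvRW_skip "sqrt".toList "math.sqrt".toList "log".toList (pvRW "pi".toList "math.pi".toList (pvRW "tan".toList "math.tan".toList (pvRW "cos".toList "math.cos".toList (pvRW "sin".toList "math.sin".toList (pvRW "^".toList "**".toList (pvIns r false)))))) (by intro i hi; have hb : i < 3 := (by simpa using hi); clear hi; interval_cases i <;> simp [List.cons_prefix_cons])]
        rw [pvRW_pos "log".toList "math.log".toList ("log".toList ++ (pvRW "sqrt".toList "math.sqrt".toList (pvRW "pi".toList "math.pi".toList (pvRW "tan".toList "math.tan".toList (pvRW "cos".toList "math.cos".toList (pvRW "sin".toList "math.sin".toList (pvRW "^".toList "**".toList (pvIns r false)))))))) (by simp <;> decide) (List.prefix_append _ _), List.drop_left]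
        rw [pvRW_skip "e".toList "math.e".toList "math.log".toList (pvRW "log".toList "math.log".toList (pvRW "sqrt".toList "math.sqrt".toList (pvRW "pi".toList "math.pi".toList (pvRW "tan".toList "math.tan".toList (pvRW "cos".toList "math.cos".toList (pvRW "sin".toList "math.sin".toList (pvRW "^".toList "**".toList (pvIns r false)))))))) (by intro i hi; have hb : i < 8 := (by simpa using hi); clear hi; interval_cases i <;> simp [List.cons_prefix_cons])]
        exact congrArg (fun z => _ ++ z) (ih r hrlen hclr false)
      by_cases hpi : "pi".toList <+: (c :: t)
      ·
        obtain ⟨r, hr⟩ := hpi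
        rw [← hr] at hcl hlen hsin hcos htan hsqrt hlog
        rw [← hr]
        have hrlen : r.length ≤ n := by simp at hlen; omega
        have hclr : pvClean r := pvClean_mono r _ (List.suffix_append _ _).isInfix hcl
        have hfind : pvTokens.find? (fun p => p.1.isPrefixOf ("pi".toList ++ r)) = some ("pi".toList, "math.pi".toList) := by
          rw [pvTokens]
          rw [List.find?_cons_of_neg (by simpa [List.isPrefixOf_iff_prefix] using hsin)]
          rw [List.find?_cons_of_neg (by simpa [List.isPrefixOf_iff_prefix] using hcos)]
          rw [List.find?_cons_of_neg (by simpa [List.isPrefixOf_iff_prefix] using htan)]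
          rw [List.find?_cons_of_neg (by simpa [List.isPrefixOf_iff_prefix] using hsqrt)]
          rw [List.find?_cons_of_neg (by simpa [List.isPrefixOf_iff_prefix] using hlog)]
          exact List.find?_cons_of_pos (by simp [List.isPrefixOf_iff_prefix])
        rw [pvScan_token "pi".toList "math.pi".toList r pd (by simp <;> decide) hfind]
        rw [pvIns_token "pi".toList r pd (by simp <;> decide) (by simp <;> decide)]
        simp only [pvChainR]
        rw [pvRW_skip "^".toList "**".toList "pi".toList (pvIns r false) (by intro i hi; have hb : i < 2 := (by simpa using hi); clear hi; interval_cases i <;> simp [List.cons_prefix_cons])]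
        rw [pvRW_skip "sin".toList "math.sin".toList "pi".toList (pvRW "^".toList "**".toList (pvIns r false)) (by intro i hi; have hb : i < 2 := (by simpa using hi); clear hi; interval_cases i <;> simp [List.cons_prefix_cons])]
        rw [pvRW_skip "cos".toList "math.cos".toList "pi".toList (pvRW "sin".toList "math.sin".toList (pvRW "^".toList "**".toList (pvIns r false))) (by intro i hi; have hb : i < 2 := (by simpa using hi); clear hi; interval_cases i <;> simp [List.cons_prefix_cons])]
        rw [pvRW_skip "tan".toList "math.tan".toList "pi".toList (pvRW "cos".toList "math.cos".toList (pvRW "sin".toList "math.sin".toList (pvRW "^".toList "**".toList (pvIns r false)))) (by intro i hi; have hb : i < 2 := (by simpa using hi); clear hi; interval_cases i <;> simp [List.cons_prefix_cons])]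
        rw [pvRW_pos "pi".toList "math.pi".toList ("pi".toList ++ (pvRW "tan".toList "math.tan".toList (pvRW "cos".toList "math.cos".toList (pvRW "sin".toList "math.sin".toList (pvRW "^".toList "**".toList (pvIns r false)))))) (by simp <;> decide) (List.prefix_append _ _), List.drop_left]
        rw [pvRW_skip "sqrt".toList "math.sqrt".toList "math.pi".toList (pvRW "pi".toList "math.pi".toList (pvRW "tan".toList "math.tan".toList (pvRW "cos".toList "math.cos".toList (pvRW "sin".toList "math.sin".toList (pvRW "^".toList "**".toList (pvIns r false)))))) (by intro i hi; have hb : i < 7 := (by simpa using hi); clear hi; interval_cases i <;> simp [List.cons_prefix_cons])]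
        rw [pvRW_skip "log".toList "math.log".toList "math.pi".toList (pvRW "sqrt".toList "math.sqrt".toList (pvRW "pi".toList "math.pi".toList (pvRW "tan".toList "math.tan".toList (pvRW "cos".toList "math.cos".toList (pvRW "sin".toList "math.sin".toList (pvRW "^".toList "**".toList (pvIns r false))))))) (by intro i hi; have hb : i < 7 := (by simpa using hi); clear hi; interval_cases i <;> simp [List.cons_prefix_cons])]
        rw [pvRW_skip "e".toList "math.e".toList "math.pi".toList (pvRW "log".toList "math.log".toList (pvRW "sqrt".toList "math.sqrt".toList (pvRW "pi".toList "math.pi".toList (pvRW "tan".toList "math.tan".toList (pvRW "cos".toList "math.cos".toList (pvRW "sin".toList "math.sin".toList (pvRW "^".toList "**".toList (pvIns r false)))))))) (by intro i hi; have hb : i < 7 := (by simpa using hi); clear hi; interval_cases i <;> simp [List.cons_prefix_cons])]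
        exact congrArg (fun z => _ ++ z) (ih r hrlen hclr false)
      by_cases he : "e".toList <+: (c :: t)
      ·
        obtain ⟨r, hr⟩ := he
        rw [← hr] at hcl hlen hsin hcos htan hsqrt hlog hpi
        rw [← hr]
        have hrlen : r.length ≤ n := by simp at hlen; omega
        have hclr : pvClean r := pvClean_mono r _ (List.suffix_append _ _).isInfix hcl
        have hfind : pvTokens.find? (fun p => p.1.isPrefixOf ("e".toList ++ r)) = some ("e".toList, "math.e".toList) := by
          rw [pvTokens]
          rw [List.find?_cons_of_neg (by simpa [List.isPrefixOf_iff_prefix] using hsin)]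
          rw [List.find?_cons_of_neg (by simpa [List.isPrefixOf_iff_prefix] using hcos)]
          rw [List.find?_cons_of_neg (by simpa [List.isPrefixOf_iff_prefix] using htan)]
          rw [List.find?_cons_of_neg (by simpa [List.isPrefixOf_iff_prefix] using hsqrt)]
          rw [List.find?_cons_of_neg (by simpa [List.isPrefixOf_iff_prefix] using hlog)]
          rw [List.find?_cons_of_neg (by simpa [List.isPrefixOf_iff_prefix] using hpi)]
          exact List.find?_cons_of_pos (by simp [List.isPrefixOf_iff_prefix])
        rw [pvScan_token "e".toList "math.e".toList r pd (by simp <;> decide) hfind]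
        rw [pvIns_token "e".toList r pd (by simp <;> decide) (by simp <;> decide)]
        simp only [pvChainR]
        rw [pvRW_skip "^".toList "**".toList "e".toList (pvIns r false) (by intro i hi; have hb : i < 1 := (by simpa using hi); clear hi; interval_cases i <;> simp [List.cons_prefix_cons])]
        rw [pvRW_skip "sin".toList "math.sin".toList "e".toList (pvRW "^".toList "**".toList (pvIns r false)) (by intro i hi; have hb : i < 1 := (by simpa using hi); clear hi; interval_cases i <;> simp [List.cons_prefix_cons])]
        rw [pvRW_skip "cos".toList "math.cos".toList "e".toList (pvRW "sin".toList "math.sin".toList (pvRW "^".toList "**".toList (pvIns r false))) (by intro i hi; have hb : i < 1 := (by simpa using hi); clear hi; interval_cases i <;> simp [List.cons_prefix_cons])]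
        rw [pvRW_skip "tan".toList "math.tan".toList "e".toList (pvRW "cos".toList "math.cos".toList (pvRW "sin".toList "math.sin".toList (pvRW "^".toList "**".toList (pvIns r false)))) (by intro i hi; have hb : i < 1 := (by simpa using hi); clear hi; interval_cases i <;> simp [List.cons_prefix_cons])]
        rw [pvRW_skip "pi".toList "math.pi".toList "e".toList (pvRW "tan".toList "math.tan".toList (pvRW "cos".toList "math.cos".toList (pvRW "sin".toList "math.sin".toList (pvRW "^".toList "**".toList (pvIns r false))))) (by intro i hi; have hb : i < 1 := (by simpa using hi); clear hi; interval_cases i <;> simp [List.cons_prefix_cons])]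
        rw [pvRW_skip "sqrt".toList "math.sqrt".toList "e".toList (pvRW "pi".toList "math.pi".toList (pvRW "tan".toList "math.tan".toList (pvRW "cos".toList "math.cos".toList (pvRW "sin".toList "math.sin".toList (pvRW "^".toList "**".toList (pvIns r false)))))) (by intro i hi; have hb : i < 1 := (by simpa using hi); clear hi; interval_cases i <;> simp [List.cons_prefix_cons])]
        rw [pvRW_skip "log".toList "math.log".toList "e".toList (pvRW "sqrt".toList "math.sqrt".toList (pvRW "pi".toList "math.pi".toList (pvRW "tan".toList "math.tan".toList (pvRW "cos".toList "math.cos".toList (pvRW "sin".toList "math.sin".toList (pvRW "^".toList "**".toList (pvIns r false))))))) (by intro i hi; have hb : i < 1 := (by simpa using hi); clear hi; interval_cases i <;> simp [List.cons_prefix_cons])]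
        rw [pvRW_pos "e".toList "math.e".toList ("e".toList ++ (pvRW "log".toList "math.log".toList (pvRW "sqrt".toList "math.sqrt".toList (pvRW "pi".toList "math.pi".toList (pvRW "tan".toList "math.tan".toList (pvRW "cos".toList "math.cos".toList (pvRW "sin".toList "math.sin".toList (pvRW "^".toList "**".toList (pvIns r false))))))))) (by simp <;> decide) (List.prefix_append _ _), List.drop_left]
        exact congrArg (fun z => _ ++ z) (ih r hrlen hclr false)
      by_cases hcaret : "^".toList <+: (c :: t)
      ·
        obtain ⟨r, hr⟩ := hcaret
        rw [← hr] at hcl hlen hsin hcos htan hsqrt hlog hpi he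
        rw [← hr]
        have hrlen : r.length ≤ n := by simp at hlen; omega
        have hclr : pvClean r := pvClean_mono r _ (List.suffix_append _ _).isInfix hcl
        have hfind : pvTokens.find? (fun p => p.1.isPrefixOf ("^".toList ++ r)) = some ("^".toList, "**".toList) := by
          rw [pvTokens]
          rw [List.find?_cons_of_neg (by simpa [List.isPrefixOf_iff_prefix] using hsin)]
          rw [List.find?_cons_of_neg (by simpa [List.isPrefixOf_iff_prefix] using hcos)]
          rw [List.find?_cons_of_neg (by simpa [List.isPrefixOf_iff_prefix] using htan)]
          rw [List.find?_cons_of_neg (by simpa [List.isPrefixOf_iff_prefix] using hsqrt)]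
          rw [List.find?_cons_of_neg (by simpa [List.isPrefixOf_iff_prefix] using hlog)]
          rw [List.find?_cons_of_neg (by simpa [List.isPrefixOf_iff_prefix] using hpi)]
          rw [List.find?_cons_of_neg (by simpa [List.isPrefixOf_iff_prefix] using he)]
          exact List.find?_cons_of_pos (by simp [List.isPrefixOf_iff_prefix])
        rw [pvScan_token "^".toList "**".toList r pd (by simp <;> decide) hfind]
        rw [pvIns_token "^".toList r pd (by simp <;> decide) (by simp <;> decide)]
        simp only [pvChainR]
        rw [pvRW_pos "^".toList "**".toList ("^".toList ++ (pvIns r false)) (by simp <;> decide) (List.prefix_append _ _), List.drop_left]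
        rw [pvRW_skip "sin".toList "math.sin".toList "**".toList (pvRW "^".toList "**".toList (pvIns r false)) (by intro i hi; have hb : i < 2 := (by simpa using hi); clear hi; interval_cases i <;> simp [List.cons_prefix_cons])]
        rw [pvRW_skip "cos".toList "math.cos".toList "**".toList (pvRW "sin".toList "math.sin".toList (pvRW "^".toList "**".toList (pvIns r false))) (by intro i hi; have hb : i < 2 := (by simpa using hi); clear hi; interval_cases i <;> simp [List.cons_prefix_cons])]
        rw [pvRW_skip "tan".toList "math.tan".toList "**".toList (pvRW "cos".toList "math.cos".toList (pvRW "sin".toList "math.sin".toList (pvRW "^".toList "**".toList (pvIns r false)))) (by intro i hi; have hb : i < 2 := (by simpa using hi); clear hi; interval_cases i <;> simp [List.cons_prefix_cons])]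
        rw [pvRW_skip "pi".toList "math.pi".toList "**".toList (pvRW "tan".toList "math.tan".toList (pvRW "cos".toList "math.cos".toList (pvRW "sin".toList "math.sin".toList (pvRW "^".toList "**".toList (pvIns r false))))) (by intro i hi; have hb : i < 2 := (by simpa using hi); clear hi; interval_cases i <;> simp [List.cons_prefix_cons])]
        rw [pvRW_skip "sqrt".toList "math.sqrt".toList "**".toList (pvRW "pi".toList "math.pi".toList (pvRW "tan".toList "math.tan".toList (pvRW "cos".toList "math.cos".toList (pvRW "sin".toList "math.sin".toList (pvRW "^".toList "**".toList (pvIns r false)))))) (by intro i hi; have hb : i < 2 := (by simpa using hi); clear hi; interval_cases i <;> simp [List.cons_prefix_cons])]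
        rw [pvRW_skip "log".toList "math.log".toList "**".toList (pvRW "sqrt".toList "math.sqrt".toList (pvRW "pi".toList "math.pi".toList (pvRW "tan".toList "math.tan".toList (pvRW "cos".toList "math.cos".toList (pvRW "sin".toList "math.sin".toList (pvRW "^".toList "**".toList (pvIns r false))))))) (by intro i hi; have hb : i < 2 := (by simpa using hi); clear hi; interval_cases i <;> simp [List.cons_prefix_cons])]
        rw [pvRW_skip "e".toList "math.e".toList "**".toList (pvRW "log".toList "math.log".toList (pvRW "sqrt".toList "math.sqrt".toList (pvRW "pi".toList "math.pi".toList (pvRW "tan".toList "math.tan".toList (pvRW "cos".toList "math.cos".toList (pvRW "sin".toList "math.sin".toList (pvRW "^".toList "**".toList (pvIns r false)))))))) (by intro i hi; have hb : i < 2 := (by simpa using hi); clear hi; interval_cases i <;> simp [List.cons_prefix_cons])]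
        exact congrArg (fun z => _ ++ z) (ih r hrlen hclr false)
      ·
        have hfind : pvTokens.find? (fun p => p.1.isPrefixOf (c :: t)) = none := by
          rw [pvTokens]
          rw [List.find?_cons_of_neg (by simpa [List.isPrefixOf_iff_prefix] using hsin)]
          rw [List.find?_cons_of_neg (by simpa [List.isPrefixOf_iff_prefix] using hcos)]
          rw [List.find?_cons_of_neg (by simpa [List.isPrefixOf_iff_prefix] using htan)]
          rw [List.find?_cons_of_neg (by simpa [List.isPrefixOf_iff_prefix] using hsqrt)]
          rw [List.find?_cons_of_neg (by simpa [List.isPrefixOf_iff_prefix] using hlog)]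
          rw [List.find?_cons_of_neg (by simpa [List.isPrefixOf_iff_prefix] using hpi)]
          rw [List.find?_cons_of_neg (by simpa [List.isPrefixOf_iff_prefix] using he)]
          rw [List.find?_cons_of_neg (by simpa [List.isPrefixOf_iff_prefix] using hcaret)]
          rfl
        have htlen : t.length ≤ n := by simp at hlen; omega
        have hclt : pvClean t := pvClean_mono t _ (List.suffix_cons c t).isInfix hcl
        rw [pvScan_plain c t pd hfind]
        rw [pvIns_cons]
        by_cases hx : c = 'x' ∧ pd = true
        · rw [if_pos hx, if_pos hx]
          show pvChainR (['*','x'] ++ pvIns t false) = _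
          simp only [pvChainR]
          rw [pvRW_skip "^".toList "**".toList ['*','x'] (pvIns t false) (by intro i hi; have hb : i < 2 := (by simpa using hi); clear hi; interval_cases i <;> simp [List.cons_prefix_cons])]
          rw [pvRW_skip "sin".toList "math.sin".toList ['*','x'] (pvRW "^".toList "**".toList (pvIns t false)) (by intro i hi; have hb : i < 2 := (by simpa using hi); clear hi; interval_cases i <;> simp [List.cons_prefix_cons])]
          rw [pvRW_skip "cos".toList "math.cos".toList ['*','x'] (pvRW "sin".toList "math.sin".toList (pvRW "^".toList "**".toList (pvIns t false))) (by intro i hi; have hb : i < 2 := (by simpa using hi); clear hi; interval_cases i <;> simp [List.cons_prefix_cons])]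
          rw [pvRW_skip "tan".toList "math.tan".toList ['*','x'] (pvRW "cos".toList "math.cos".toList (pvRW "sin".toList "math.sin".toList (pvRW "^".toList "**".toList (pvIns t false)))) (by intro i hi; have hb : i < 2 := (by simpa using hi); clear hi; interval_cases i <;> simp [List.cons_prefix_cons])]
          rw [pvRW_skip "pi".toList "math.pi".toList ['*','x'] (pvRW "tan".toList "math.tan".toList (pvRW "cos".toList "math.cos".toList (pvRW "sin".toList "math.sin".toList (pvRW "^".toList "**".toList (pvIns t false))))) (by intro i hi; have hb : i < 2 := (by simpa using hi); clear hi; interval_cases i <;> simp [List.cons_prefix_cons])]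
          rw [pvRW_skip "sqrt".toList "math.sqrt".toList ['*','x'] (pvRW "pi".toList "math.pi".toList (pvRW "tan".toList "math.tan".toList (pvRW "cos".toList "math.cos".toList (pvRW "sin".toList "math.sin".toList (pvRW "^".toList "**".toList (pvIns t false)))))) (by intro i hi; have hb : i < 2 := (by simpa using hi); clear hi; interval_cases i <;> simp [List.cons_prefix_cons])]
          rw [pvRW_skip "log".toList "math.log".toList ['*','x'] (pvRW "sqrt".toList "math.sqrt".toList (pvRW "pi".toList "math.pi".toList (pvRW "tan".toList "math.tan".toList (pvRW "cos".toList "math.cos".toList (pvRW "sin".toList "math.sin".toList (pvRW "^".toList "**".toList (pvIns t false))))))) (by intro i hi; have hb : i < 2 := (by simpa using hi); clear hi; interval_cases i <;> simp [List.cons_prefix_cons])]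
          rw [pvRW_skip "e".toList "math.e".toList ['*','x'] (pvRW "log".toList "math.log".toList (pvRW "sqrt".toList "math.sqrt".toList (pvRW "pi".toList "math.pi".toList (pvRW "tan".toList "math.tan".toList (pvRW "cos".toList "math.cos".toList (pvRW "sin".toList "math.sin".toList (pvRW "^".toList "**".toList (pvIns t false)))))))) (by intro i hi; have hb : i < 2 := (by simpa using hi); clear hi; interval_cases i <;> simp [List.cons_prefix_cons])]
          exact congrArg (fun z => ['*','x'] ++ z) (ih t htlen hclt false)
        · rw [if_neg hx, if_neg hx]
          simp only [pvChainR]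
          have hk0 : ¬ "^".toList <+: (c :: (pvIns t (PySem.Chars.isdigit c))) := by
            intro hp
            have hp2 : ['^'] <+: (c :: (pvIns t (PySem.Chars.isdigit c))) := by simpa using hp
            have hc := (List.cons_prefix_cons.mp hp2).1
            exact hcaret (by simp [List.cons_prefix_cons, ← hc])
          have hk1 : ¬ "sin".toList <+: (c :: (pvRW "^".toList "**".toList (pvIns t (PySem.Chars.isdigit c)))) := by
            intro hp
            have hp2 : ('s' :: ['i','n']) <+: (c :: (pvRW "^".toList "**".toList (pvIns t (PySem.Chars.isdigit c)))) := by simpa using hp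
            obtain ⟨hc, hrest⟩ := List.cons_prefix_cons.mp hp2
            have hrest0 : ['i','n'] <+: (pvIns t (PySem.Chars.isdigit c)) := pvRW_no_new_prefix "^".toList "**".toList (by simp) '*' ['*'] (by simp) _ _ (by decide) hrest
            have hrestI : ['i','n'] <+: t := pvIns_no_new_prefix _ _ _ (by decide) hrest0
            exact hsin (by simpa using List.cons_prefix_cons.mpr ⟨hc, hrestI⟩)
          have hk2 : ¬ "cos".toList <+: (c :: (pvRW "sin".toList "math.sin".toList (pvRW "^".toList "**".toList (pvIns t (PySem.Chars.isdigit c))))) := by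
            intro hp
            have hp2 : ('c' :: ['o','s']) <+: (c :: (pvRW "sin".toList "math.sin".toList (pvRW "^".toList "**".toList (pvIns t (PySem.Chars.isdigit c))))) := by simpa using hp
            obtain ⟨hc, hrest⟩ := List.cons_prefix_cons.mp hp2
            have hrest1 : ['o','s'] <+: (pvRW "^".toList "**".toList (pvIns t (PySem.Chars.isdigit c))) := pvRW_no_new_prefix "sin".toList "math.sin".toList (by simp) 'm' "ath.sin".toList (by simp) _ _ (by decide) hrest
            have hrest0 : ['o','s'] <+: (pvIns t (PySem.Chars.isdigit c)) := pvRW_no_new_prefix "^".toList "**".toList (by simp) '*' ['*'] (by simp) _ _ (by decide) hrest1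
            have hrestI : ['o','s'] <+: t := pvIns_no_new_prefix _ _ _ (by decide) hrest0
            exact hcos (by simpa using List.cons_prefix_cons.mpr ⟨hc, hrestI⟩)
          have hk3 : ¬ "tan".toList <+: (c :: (pvRW "cos".toList "math.cos".toList (pvRW "sin".toList "math.sin".toList (pvRW "^".toList "**".toList (pvIns t (PySem.Chars.isdigit c)))))) := by
            intro hp
            have hp2 : ('t' :: ['a','n']) <+: (c :: (pvRW "cos".toList "math.cos".toList (pvRW "sin".toList "math.sin".toList (pvRW "^".toList "**".toList (pvIns t (PySem.Chars.isdigit c)))))) := by simpa using hp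
            obtain ⟨hc, hrest⟩ := List.cons_prefix_cons.mp hp2
            have hrest2 : ['a','n'] <+: (pvRW "sin".toList "math.sin".toList (pvRW "^".toList "**".toList (pvIns t (PySem.Chars.isdigit c)))) := pvRW_no_new_prefix "cos".toList "math.cos".toList (by simp) 'm' "ath.cos".toList (by simp) _ _ (by decide) hrest
            have hrest1 : ['a','n'] <+: (pvRW "^".toList "**".toList (pvIns t (PySem.Chars.isdigit c))) := pvRW_no_new_prefix "sin".toList "math.sin".toList (by simp) 'm' "ath.sin".toList (by simp) _ _ (by decide) hrest2
            have hrest0 : ['a','n'] <+: (pvIns t (PySem.Chars.isdigit c)) := pvRW_no_new_prefix "^".toList "**".toList (by simp) '*' ['*'] (by simp) _ _ (by decide) hrest1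
            have hrestI : ['a','n'] <+: t := pvIns_no_new_prefix _ _ _ (by decide) hrest0
            exact htan (by simpa using List.cons_prefix_cons.mpr ⟨hc, hrestI⟩)
          have hk4 : ¬ "pi".toList <+: (c :: (pvRW "tan".toList "math.tan".toList (pvRW "cos".toList "math.cos".toList (pvRW "sin".toList "math.sin".toList (pvRW "^".toList "**".toList (pvIns t (PySem.Chars.isdigit c))))))) := by
            intro hp
            have hp2 : ('p' :: ['i']) <+: (c :: (pvRW "tan".toList "math.tan".toList (pvRW "cos".toList "math.cos".toList (pvRW "sin".toList "math.sin".toList (pvRW "^".toList "**".toList (pvIns t (PySem.Chars.isdigit c))))))) := by simpa using hp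
            obtain ⟨hc, hrest⟩ := List.cons_prefix_cons.mp hp2
            have hrest3 : ['i'] <+: (pvRW "cos".toList "math.cos".toList (pvRW "sin".toList "math.sin".toList (pvRW "^".toList "**".toList (pvIns t (PySem.Chars.isdigit c))))) := pvRW_no_new_prefix "tan".toList "math.tan".toList (by simp) 'm' "ath.tan".toList (by simp) _ _ (by decide) hrest
            have hrest2 : ['i'] <+: (pvRW "sin".toList "math.sin".toList (pvRW "^".toList "**".toList (pvIns t (PySem.Chars.isdigit c)))) := pvRW_no_new_prefix "cos".toList "math.cos".toList (by simp) 'm' "ath.cos".toList (by simp) _ _ (by decide) hrest3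
            have hrest1 : ['i'] <+: (pvRW "^".toList "**".toList (pvIns t (PySem.Chars.isdigit c))) := pvRW_no_new_prefix "sin".toList "math.sin".toList (by simp) 'm' "ath.sin".toList (by simp) _ _ (by decide) hrest2
            have hrest0 : ['i'] <+: (pvIns t (PySem.Chars.isdigit c)) := pvRW_no_new_prefix "^".toList "**".toList (by simp) '*' ['*'] (by simp) _ _ (by decide) hrest1
            have hrestI : ['i'] <+: t := pvIns_no_new_prefix _ _ _ (by decide) hrest0
            exact hpi (by simpa using List.cons_prefix_cons.mpr ⟨hc, hrestI⟩)
          have hk5 : ¬ "sqrt".toList <+: (c :: (pvRW "pi".toList "math.pi".toList (pvRW "tan".toList "math.tan".toList (pvRW "cos".toList "math.cos".toList (pvRW "sin".toList "math.sin".toList (pvRW "^".toList "**".toList (pvIns t (PySem.Chars.isdigit c)))))))) := by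
            intro hp
            have hp2 : ('s' :: ['q','r','t']) <+: (c :: (pvRW "pi".toList "math.pi".toList (pvRW "tan".toList "math.tan".toList (pvRW "cos".toList "math.cos".toList (pvRW "sin".toList "math.sin".toList (pvRW "^".toList "**".toList (pvIns t (PySem.Chars.isdigit c)))))))) := by simpa using hp
            obtain ⟨hc, hrest⟩ := List.cons_prefix_cons.mp hp2
            have hrest4 : ['q','r','t'] <+: (pvRW "tan".toList "math.tan".toList (pvRW "cos".toList "math.cos".toList (pvRW "sin".toList "math.sin".toList (pvRW "^".toList "**".toList (pvIns t (PySem.Chars.isdigit c)))))) := pvRW_no_new_prefix "pi".toList "math.pi".toList (by simp) 'm' "ath.pi".toList (by simp) _ _ (by decide) hrest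
            have hrest3 : ['q','r','t'] <+: (pvRW "cos".toList "math.cos".toList (pvRW "sin".toList "math.sin".toList (pvRW "^".toList "**".toList (pvIns t (PySem.Chars.isdigit c))))) := pvRW_no_new_prefix "tan".toList "math.tan".toList (by simp) 'm' "ath.tan".toList (by simp) _ _ (by decide) hrest4
            have hrest2 : ['q','r','t'] <+: (pvRW "sin".toList "math.sin".toList (pvRW "^".toList "**".toList (pvIns t (PySem.Chars.isdigit c)))) := pvRW_no_new_prefix "cos".toList "math.cos".toList (by simp) 'm' "ath.cos".toList (by simp) _ _ (by decide) hrest3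
            have hrest1 : ['q','r','t'] <+: (pvRW "^".toList "**".toList (pvIns t (PySem.Chars.isdigit c))) := pvRW_no_new_prefix "sin".toList "math.sin".toList (by simp) 'm' "ath.sin".toList (by simp) _ _ (by decide) hrest2
            have hrest0 : ['q','r','t'] <+: (pvIns t (PySem.Chars.isdigit c)) := pvRW_no_new_prefix "^".toList "**".toList (by simp) '*' ['*'] (by simp) _ _ (by decide) hrest1
            have hrestI : ['q','r','t'] <+: t := pvIns_no_new_prefix _ _ _ (by decide) hrest0
            exact hsqrt (by simpa using List.cons_prefix_cons.mpr ⟨hc, hrestI⟩)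
          have hk6 : ¬ "log".toList <+: (c :: (pvRW "sqrt".toList "math.sqrt".toList (pvRW "pi".toList "math.pi".toList (pvRW "tan".toList "math.tan".toList (pvRW "cos".toList "math.cos".toList (pvRW "sin".toList "math.sin".toList (pvRW "^".toList "**".toList (pvIns t (PySem.Chars.isdigit c))))))))) := by
            intro hp
            have hp2 : ('l' :: ['o','g']) <+: (c :: (pvRW "sqrt".toList "math.sqrt".toList (pvRW "pi".toList "math.pi".toList (pvRW "tan".toList "math.tan".toList (pvRW "cos".toList "math.cos".toList (pvRW "sin".toList "math.sin".toList (pvRW "^".toList "**".toList (pvIns t (PySem.Chars.isdigit c))))))))) := by simpa using hp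
            obtain ⟨hc, hrest⟩ := List.cons_prefix_cons.mp hp2
            have hrest5 : ['o','g'] <+: (pvRW "pi".toList "math.pi".toList (pvRW "tan".toList "math.tan".toList (pvRW "cos".toList "math.cos".toList (pvRW "sin".toList "math.sin".toList (pvRW "^".toList "**".toList (pvIns t (PySem.Chars.isdigit c))))))) := pvRW_no_new_prefix "sqrt".toList "math.sqrt".toList (by simp) 'm' "ath.sqrt".toList (by simp) _ _ (by decide) hrest
            have hrest4 : ['o','g'] <+: (pvRW "tan".toList "math.tan".toList (pvRW "cos".toList "math.cos".toList (pvRW "sin".toList "math.sin".toList (pvRW "^".toList "**".toList (pvIns t (PySem.Chars.isdigit c)))))) := pvRW_no_new_prefix "pi".toList "math.pi".toList (by simp) 'm' "ath.pi".toList (by simp) _ _ (by decide) hrest5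
            have hrest3 : ['o','g'] <+: (pvRW "cos".toList "math.cos".toList (pvRW "sin".toList "math.sin".toList (pvRW "^".toList "**".toList (pvIns t (PySem.Chars.isdigit c))))) := pvRW_no_new_prefix "tan".toList "math.tan".toList (by simp) 'm' "ath.tan".toList (by simp) _ _ (by decide) hrest4
            have hrest2 : ['o','g'] <+: (pvRW "sin".toList "math.sin".toList (pvRW "^".toList "**".toList (pvIns t (PySem.Chars.isdigit c)))) := pvRW_no_new_prefix "cos".toList "math.cos".toList (by simp) 'm' "ath.cos".toList (by simp) _ _ (by decide) hrest3
            have hrest1 : ['o','g'] <+: (pvRW "^".toList "**".toList (pvIns t (PySem.Chars.isdigit c))) := pvRW_no_new_prefix "sin".toList "math.sin".toList (by simp) 'm' "ath.sin".toList (by simp) _ _ (by decide) hrest2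
            have hrest0 : ['o','g'] <+: (pvIns t (PySem.Chars.isdigit c)) := pvRW_no_new_prefix "^".toList "**".toList (by simp) '*' ['*'] (by simp) _ _ (by decide) hrest1
            have hrestI : ['o','g'] <+: t := pvIns_no_new_prefix _ _ _ (by decide) hrest0
            exact hlog (by simpa using List.cons_prefix_cons.mpr ⟨hc, hrestI⟩)
          have hk7 : ¬ "e".toList <+: (c :: (pvRW "log".toList "math.log".toList (pvRW "sqrt".toList "math.sqrt".toList (pvRW "pi".toList "math.pi".toList (pvRW "tan".toList "math.tan".toList (pvRW "cos".toList "math.cos".toList (pvRW "sin".toList "math.sin".toList (pvRW "^".toList "**".toList (pvIns t (PySem.Chars.isdigit c)))))))))) := by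
            intro hp
            have hp2 : ['e'] <+: (c :: (pvRW "log".toList "math.log".toList (pvRW "sqrt".toList "math.sqrt".toList (pvRW "pi".toList "math.pi".toList (pvRW "tan".toList "math.tan".toList (pvRW "cos".toList "math.cos".toList (pvRW "sin".toList "math.sin".toList (pvRW "^".toList "**".toList (pvIns t (PySem.Chars.isdigit c)))))))))) := by simpa using hp
            have hc := (List.cons_prefix_cons.mp hp2).1
            exact he (by simp [List.cons_prefix_cons, ← hc])
          rw [pvRW_neg "^".toList "**".toList c (pvIns t (PySem.Chars.isdigit c)) hk0]
          rw [pvRW_neg "sin".toList "math.sin".toList c (pvRW "^".toList "**".toList (pvIns t (PySem.Chars.isdigit c))) hk1]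
          rw [pvRW_neg "cos".toList "math.cos".toList c (pvRW "sin".toList "math.sin".toList (pvRW "^".toList "**".toList (pvIns t (PySem.Chars.isdigit c)))) hk2]
          rw [pvRW_neg "tan".toList "math.tan".toList c (pvRW "cos".toList "math.cos".toList (pvRW "sin".toList "math.sin".toList (pvRW "^".toList "**".toList (pvIns t (PySem.Chars.isdigit c))))) hk3]
          rw [pvRW_neg "pi".toList "math.pi".toList c (pvRW "tan".toList "math.tan".toList (pvRW "cos".toList "math.cos".toList (pvRW "sin".toList "math.sin".toList (pvRW "^".toList "**".toList (pvIns t (PySem.Chars.isdigit c)))))) hk4]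
          rw [pvRW_neg "sqrt".toList "math.sqrt".toList c (pvRW "pi".toList "math.pi".toList (pvRW "tan".toList "math.tan".toList (pvRW "cos".toList "math.cos".toList (pvRW "sin".toList "math.sin".toList (pvRW "^".toList "**".toList (pvIns t (PySem.Chars.isdigit c))))))) hk5]
          rw [pvRW_neg "log".toList "math.log".toList c (pvRW "sqrt".toList "math.sqrt".toList (pvRW "pi".toList "math.pi".toList (pvRW "tan".toList "math.tan".toList (pvRW "cos".toList "math.cos".toList (pvRW "sin".toList "math.sin".toList (pvRW "^".toList "**".toList (pvIns t (PySem.Chars.isdigit c)))))))) hk6]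
          rw [pvRW_neg "e".toList "math.e".toList c (pvRW "log".toList "math.log".toList (pvRW "sqrt".toList "math.sqrt".toList (pvRW "pi".toList "math.pi".toList (pvRW "tan".toList "math.tan".toList (pvRW "cos".toList "math.cos".toList (pvRW "sin".toList "math.sin".toList (pvRW "^".toList "**".toList (pvIns t (PySem.Chars.isdigit c))))))))) hk7]
          exact congrArg (fun z => c :: z) (ih t htlen hclt (PySem.Chars.isdigit c))


-- ===== VERDICT (by name: the statement is the Claim_ definition above) =====
theorem prepare_expression_spec : Claim_equal_prepare_expression := by
  intro s _ hpre
  unfold Spec_prepare_expression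
  apply String.toList_injective
  rw [pvA_eq, pvB_eq]
  obtain ⟨h1, h2, h3⟩ := hpre
  refine pvMain s.toList.length s.toList le_rfl ⟨?_, ?_, ?_⟩ false
  · intro hi
    exact absurd ((PySem.Str.isIn_iff_infix "cosin" s).mpr hi) (by simpa using h1)
  · intro hi
    exact absurd ((PySem.Str.isIn_iff_infix "cosqrt" s).mpr hi) (by simpa using h2)
  · intro hi
    exact absurd ((PySem.Str.isIn_iff_infix "sqrtan" s).mpr hi) (by simpa using h3)
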